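-- pv_equiv track=rewrite | github.com/fritzo/pomagma | src/reducer/util.py | trool_any
-- ===== SOURCE A (Python) =====
-- def trool_any(args):
--     """Combine according to:
--
--           | None  True  False
--     ------+------------------
--      None | None  True  None
--      True | True  True  True
--     False | None  True  False
--
--     """
--     result = False
--     for arg in args:
--         if arg is True:
--             return True
--         elif arg is None:
--             result = None
--     return result
-- ===== SOURCE B (Python) =====
-- def trool_any(args):
--     items = list(args)
--     if any(x is True for x in items):
--         return True
--     if any(x is None for x in items):
--         return None
--     return False
-- ===== Notes on version B (the rewrite author's own statement) =====
-- stated objective: simpler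
-- what changed: Replaces A's single accumulator-carrying loop with early return by materializing the iterable and doing two identity-check scans (any True, else any None, else False).
import Mathlib
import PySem

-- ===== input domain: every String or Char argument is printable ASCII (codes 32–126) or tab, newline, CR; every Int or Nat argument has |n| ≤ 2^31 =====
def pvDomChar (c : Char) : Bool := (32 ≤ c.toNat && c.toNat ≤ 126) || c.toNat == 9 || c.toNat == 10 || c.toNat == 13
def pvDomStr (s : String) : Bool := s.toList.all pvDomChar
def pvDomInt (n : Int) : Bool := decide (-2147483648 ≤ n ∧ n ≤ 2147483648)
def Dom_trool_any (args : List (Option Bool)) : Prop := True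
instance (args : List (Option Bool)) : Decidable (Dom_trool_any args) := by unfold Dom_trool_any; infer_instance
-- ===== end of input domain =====

-- ===== PORT A =====
-- literal port of A: loop with accumulator `result`, early return on `some true`
def troolAnyLoop (args : List (Option Bool)) (result : Option Bool) : Option Bool :=
  match args with
  | [] => result
  | arg :: rest =>
    if arg = some true then some true
    else if arg = none then troolAnyLoop rest none
    else troolAnyLoop rest result

def trool_any (args : List (Option Bool)) : Option Bool :=
  troolAnyLoop args (some false)

-- ===== PORT B =====
-- port of B: two whole-list scans, then False
def trool_any_alt (args : List (Option Bool)) : Option Bool :=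
  if args.any (fun x => x = some true) then some true
  else if args.any (fun x => x = none) then none
  else some false

-- ===== PRECONDITION & SPEC =====
def Spec_trool_any (args : List (Option Bool)) (out : Option Bool) : Prop := out = trool_any_alt args
instance (args : List (Option Bool)) (out : Option Bool) : Decidable (Spec_trool_any args out) := by unfold Spec_trool_any; infer_instance

-- ===== CLAIM (what is proved, stated in full; the proofs are below) =====
def Claim_equal_trool_any : Prop := ∀ (args : List (Option Bool)), Dom_trool_any args → Spec_trool_any args (trool_any args)

-- ===== LEMMAS AND PROOFS =====

-- ===== VERDICT (by name: the statement is the Claim_ definition above) =====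
lemma troolAnyLoop_eq (args : List (Option Bool)) (r : Option Bool)
    (hr : r = some false ∨ r = none) :
    troolAnyLoop args r =
      (if args.any (fun x => x = some true) then some true
       else if args.any (fun x => x = none) then none
       else r) := by
  induction args generalizing r with
  | nil => simp [troolAnyLoop]
  | cons a rest ih =>
    match a with
    | some true => simp [troolAnyLoop]
    | none =>
        rw [troolAnyLoop]
        simp only [List.any_cons]
        rw [ih none (Or.inr rfl)]
        rcases hr with h | h <;> subst h <;> simp <;> split <;> simp
    | some false =>
        rw [troolAnyLoop]
        simp only [List.any_cons]
        rw [ih r hr]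
        simp

theorem trool_any_spec : Claim_equal_trool_any := by
  intro args _
  unfold Spec_trool_any trool_any trool_any_alt
  rw [troolAnyLoop_eq args _ (Or.inl rfl)]
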